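-- pv_equiv track=rewrite | github.com/CloverWebster/aoc24 | day 12.py | peri
-- ===== SOURCE A (Python) =====
-- def peri(array):
--     count = 0
--     for x in range(1,len(array),2):
--         coords = sorted(array[x])
--         prev = -2
--         for y in range(0,len(coords)):
--             if coords[y] != prev + 1:
--                 count += 1
--             prev = coords[y]
--     return count
-- ===== SOURCE B (Python) =====
-- def peri(array):
--     count = 0
--     for x in range(1, len(array), 2):
--         row = array[x]
--         s = set(row)
--         count += len(row) - len(s) + sum(1 for v in s if v - 1 not in s)
--     return count
-- ===== Notes on version B (the rewrite author's own statement) =====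
-- stated objective: alternative
-- what changed: Per odd row, A sorts the row and scans adjacent elements with a prev sentinel; B never sorts: it builds a set and computes duplicates (len(row)-len(set)) plus the number of maximal-run starts (v in set with v-1 not in set) from membership alone.
-- intended difference: On inputs where some odd-indexed row has minimum exactly -1, A's prev=-2 sentinel makes the smallest element satisfy coords[0]==prev+1 so A omits that run group (e.g. [[],[-1]] -> 0); B counts one count per group (-> 1), which is the intended value. — e.g. on peri([[], [-1]]): A returns 0, B returns 1
import Mathlib
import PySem

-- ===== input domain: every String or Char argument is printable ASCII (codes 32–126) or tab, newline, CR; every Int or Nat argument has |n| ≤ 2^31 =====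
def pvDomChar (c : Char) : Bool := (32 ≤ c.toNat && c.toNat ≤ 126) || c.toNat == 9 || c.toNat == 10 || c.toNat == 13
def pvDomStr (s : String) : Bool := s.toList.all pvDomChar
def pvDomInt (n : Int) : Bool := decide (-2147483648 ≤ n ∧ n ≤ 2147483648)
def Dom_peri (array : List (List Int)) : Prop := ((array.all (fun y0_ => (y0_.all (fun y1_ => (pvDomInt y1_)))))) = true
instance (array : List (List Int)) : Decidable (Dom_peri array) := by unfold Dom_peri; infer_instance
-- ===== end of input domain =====

-- B replaces A's sort-then-adjacent-scan per odd row by set arithmetic: duplicates plus maximal-run starts, computed from membership alone (objective: alternative).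

-- ===== PORT A =====
def peri (array : List (List Int)) : Int :=
  (PySem.List.pyRange 1 (array.length : Int) 2).foldl (fun count x =>
    let coords := PySem.List.sorted (PySem.List.pyGetD array x []) (fun v => v) false
    ((PySem.List.pyRange 0 (coords.length : Int) 1).foldl
      (fun st y =>
        let c := PySem.List.pyGetD coords y 0
        (if c ≠ st.2 + 1 then st.1 + 1 else st.1, c))
      (count, -2)).1) 0

-- ===== PORT B =====
def peri_alt (array : List (List Int)) : Int :=
  (PySem.List.pyRange 1 (array.length : Int) 2).foldl (fun count x =>
    let row := PySem.List.pyGetD array x []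
    let s : PySem.Set Int := PySem.Set.ofList row
    count + ((row.length : Int) - (s.length : Int)
      + (s.countP (fun v => !(PySem.Set.contains s (v - 1))) : Int))) 0

-- ===== PRECONDITION & SPEC =====
-- On inputs where some odd-indexed row has minimum exactly -1, A's sentinel prev = -2 makes the
-- first sorted element -1 satisfy coords[0] == prev + 1, so A silently fails to count that run
-- group; B counts it, which is the intended value (one count per group).
def D_peri (array : List (List Int)) : Prop :=
  ∃ x ∈ PySem.List.pyRange 1 (array.length : Int) 2,
    (-1 : Int) ∈ PySem.List.pyGetD array x [] ∧
      ∀ v ∈ PySem.List.pyGetD array x [], (-1 : Int) ≤ v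
instance (array : List (List Int)) : Decidable (D_peri array) := by unfold D_peri; infer_instance
def Spec_peri (array : List (List Int)) (out : Int) : Prop := ¬ D_peri array → out = peri_alt array
instance (array : List (List Int)) (out : Int) : Decidable (Spec_peri array out) := by unfold Spec_peri; infer_instance
def pvDiffWitness_peri : List (List Int) := [[], [-1]]
def pvDiffWitnessOut_peri : Int × Int := (0, 1)

-- ===== CLAIM (what is proved, stated in full; the proofs are below) =====
def Claim_unchanged_peri : Prop := ∀ (array : List (List Int)), Dom_peri array → Spec_peri array (peri array)
def Claim_changed_peri : Prop := Dom_peri (pvDiffWitness_peri) ∧ D_peri (pvDiffWitness_peri) ∧ peri (pvDiffWitness_peri) = pvDiffWitnessOut_peri.1 ∧ peri_alt (pvDiffWitness_peri) = pvDiffWitnessOut_peri.2 ∧ pvDiffWitnessOut_peri.1 ≠ pvDiffWitnessOut_peri.2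
def Claim_exact_peri : Prop := ∀ (array : List (List Int)), Dom_peri array → D_peri array → peri array ≠ peri_alt array

-- ===== LEMMAS AND PROOFS =====

-- A's inner count as structural recursion over the sorted row
def fA : Int → List Int → Int
  | _, [] => 0
  | p, a :: t => (if a ≠ p + 1 then 1 else 0) + fA a t

-- B's per-row value
def brow (row : List Int) : Int :=
  (row.length : Int) - ((PySem.Set.ofList row).length : Int)
    + ((PySem.Set.ofList row).countP (fun v => !(PySem.Set.contains (PySem.Set.ofList row) (v - 1))) : Int)

-- 1 on rows whose minimum is exactly -1 (A's undercount), else 0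
def badI (row : List Int) : Int :=
  if ((-1 : Int) ∈ row ∧ ∀ v ∈ row, (-1 : Int) ≤ v) then 1 else 0

lemma fA_fst (coords : List Int) : ∀ (c p : Int),
    (coords.foldl (fun st cv => (if cv ≠ st.2 + 1 then st.1 + 1 else st.1, cv)) (c, p)).1
      = c + fA p coords := by
  induction coords with
  | nil => intro c p; simp [fA]
  | cons a t ih =>
      intro c p
      simp only [List.foldl_cons, fA, ih]
      split_ifs <;> ring

-- number of run starts of a finite set of integers
def starts (F : Finset Int) : Int := (F.filter (fun v => v - 1 ∉ F)).card

lemma core (t : List Int) : ∀ (a : Int), (a :: t).Pairwise (· ≤ ·) →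
    1 + fA a t = ((a :: t).length : Int) - ((a :: t).toFinset.card : Int) + starts (a :: t).toFinset := by
  induction t with
  | nil =>
      intro a _
      have h1 : (a - 1 ∉ ({a} : Finset Int)) := by
        simp only [Finset.mem_singleton]; omega
      simp [fA, starts, Finset.filter_singleton, h1]
  | cons b t' ih =>
      intro a hp
      have hab : a ≤ b := (List.pairwise_cons.1 hp).1 b (by simp)
      have hp' : (b :: t').Pairwise (· ≤ ·) := (List.pairwise_cons.1 hp).2
      have hbmin : ∀ x ∈ t', b ≤ x := (List.pairwise_cons.1 hp').1
      have IH := ih b hp'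
      by_cases hEq : a = b
      · subst hEq
        have hmem : a ∈ (a :: t').toFinset := by simp
        have hset : (a :: a :: t').toFinset = (a :: t').toFinset := by
          simp [List.toFinset_cons, Finset.insert_eq_self.2 hmem]
        have hfa : fA a (a :: t') = 1 + fA a t' := by
          simp [fA]
        rw [hfa, hset]
        simp only [List.length_cons] at IH ⊢
        push_cast
        push_cast at IH
        omega
      · have hlt : a < b := lt_of_le_of_ne hab hEq
        have hnotmem : a ∉ (b :: t').toFinset := by
          simp only [List.mem_toFinset, List.mem_cons]
          rintro (h | h)
          · omega
          · exact absurd (hbmin a h) (by omega)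
        have hset : (a :: b :: t').toFinset = insert a (b :: t').toFinset := by
          simp [List.toFinset_cons]
        have hcard : ((a :: b :: t').toFinset.card : Int) = ((b :: t').toFinset.card : Int) + 1 := by
          rw [hset, Finset.card_insert_of_notMem hnotmem]; push_cast; ring
        -- elements of (b :: t').toFinset are ≥ b
        have hge : ∀ v ∈ (b :: t').toFinset, b ≤ v := by
          intro v hv
          simp only [List.mem_toFinset, List.mem_cons] at hv
          rcases hv with h | h
          · omega
          · exact hbmin v h
        have ham1 : a - 1 ∉ insert a (b :: t').toFinset := by
          simp only [Finset.mem_insert]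
          rintro (h | h)
          · omega
          · exact absurd (hge _ h) (by omega)
        have hstarts : starts (insert a (b :: t').toFinset)
            = starts (b :: t').toFinset + 1 - (if b = a + 1 then 1 else 0) := by
          unfold starts
          rw [Finset.filter_insert]
          rw [if_pos ham1]
          rw [Finset.card_insert_of_notMem (by
            intro h
            exact hnotmem (Finset.mem_of_mem_filter a h))]
          by_cases hb : b = a + 1
          · -- a + 1 = b is in the set; its predecessor status changes
            have hfe : ((b :: t').toFinset.filter (fun v => v - 1 ∉ insert a (b :: t').toFinset))
                = ((b :: t').toFinset.filter (fun v => v - 1 ∉ (b :: t').toFinset)).erase b := by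
              ext v
              simp only [Finset.mem_filter, Finset.mem_erase, Finset.mem_insert]
              constructor
              · rintro ⟨hv, hni⟩
                refine ⟨?_, hv, fun h => hni (Or.inr h)⟩
                intro hvb; subst hvb; exact hni (Or.inl (by omega))
              · rintro ⟨hvb, hv, hni⟩
                refine ⟨hv, ?_⟩
                rintro (h | h)
                · exact hvb (by omega)
                · exact hni h
            have hbmem : b ∈ ((b :: t').toFinset.filter (fun v => v - 1 ∉ (b :: t').toFinset)) := by
              refine Finset.mem_filter.2 ⟨by simp, ?_⟩
              intro h
              subst hb
              exact hnotmem (by simpa using h)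
            rw [hfe, Finset.card_erase_of_mem hbmem, if_pos hb]
            have hpos : 0 < ((b :: t').toFinset.filter (fun v => v - 1 ∉ (b :: t').toFinset)).card :=
              Finset.card_pos.2 ⟨b, hbmem⟩
            push_cast [Nat.cast_sub (by omega : 1 ≤ ((b :: t').toFinset.filter (fun v => v - 1 ∉ (b :: t').toFinset)).card)]
            ring
          · have hfe : ((b :: t').toFinset.filter (fun v => v - 1 ∉ insert a (b :: t').toFinset))
                = ((b :: t').toFinset.filter (fun v => v - 1 ∉ (b :: t').toFinset)) := by
              ext v
              simp only [Finset.mem_filter, Finset.mem_insert]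
              constructor
              · rintro ⟨hv, hni⟩; exact ⟨hv, fun h => hni (Or.inr h)⟩
              · rintro ⟨hv, hni⟩
                refine ⟨hv, ?_⟩
                rintro (h | h)
                · have := hge v hv; omega
                · exact hni h
            rw [hfe, if_neg hb]
            push_cast; ring
        have hfa : fA a (b :: t') = (if b ≠ a + 1 then 1 else 0) + fA b t' := by simp [fA]
        rw [hfa, hset, hstarts]
        have hci : (((insert a (b :: t').toFinset).card : Int)) = ((b :: t').toFinset.card : Int) + 1 := by
          rw [Finset.card_insert_of_notMem hnotmem]; push_cast; ring
        simp only [List.length_cons] at IH ⊢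
        rw [hci]
        by_cases hb : b = a + 1
        · rw [if_neg (by simp [hb] : ¬ b ≠ a + 1), if_pos hb]
          push_cast at IH ⊢
          omega
        · rw [if_pos hb, if_neg hb]
          push_cast at IH ⊢
          omega

-- transfer brow to toFinset quantities
lemma brow_eq (row : List Int) :
    brow row = (row.length : Int) - (row.toFinset.card : Int) + starts row.toFinset := by
  unfold brow starts
  have hnd : (PySem.Set.ofList row).Nodup := PySem.Set.nodup_ofList row
  have hset : (PySem.Set.ofList row).toFinset = row.toFinset := by
    ext v; simp [PySem.Set.mem_ofList]
  have hlen : (PySem.Set.ofList row).length = row.toFinset.card := by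
    rw [← hset, List.toFinset_card_of_nodup hnd]
  have hpred : ∀ v : Int, (!(PySem.Set.contains (PySem.Set.ofList row) (v - 1))) = decide ((v - 1) ∉ row) := by
    intro v
    by_cases h : (v - 1) ∈ row
    · have hc : PySem.Set.contains (PySem.Set.ofList row) (v - 1) = true := by
        rw [PySem.Set.contains_iff, PySem.Set.mem_ofList]; exact h
      simp [hc, h]
    · have hc : ¬ (PySem.Set.contains (PySem.Set.ofList row) (v - 1) = true) := by
        rw [PySem.Set.contains_iff, PySem.Set.mem_ofList]; exact h
      simp only [Bool.not_eq_true] at hc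
      simp [hc, h]
  have hcount : (PySem.Set.ofList row).countP (fun v => !(PySem.Set.contains (PySem.Set.ofList row) (v - 1)))
      = (row.toFinset.filter (fun v => v - 1 ∉ row.toFinset)).card := by
    rw [List.countP_eq_length_filter]
    rw [List.filter_congr (fun v _ => hpred v)]
    have hndf : ((PySem.Set.ofList row).filter (fun v => decide ((v - 1) ∉ row))).Nodup :=
      hnd.filter _
    rw [← List.toFinset_card_of_nodup hndf]
    congr 1
    ext v
    simp only [List.mem_toFinset, List.mem_filter, Finset.mem_filter, PySem.Set.mem_ofList,
      decide_eq_true_eq]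
  rw [hlen, hcount]

-- the per-row relation: A's count = B's value minus the min-is-(-1) correction
lemma row_key (row : List Int) :
    fA (-2) (PySem.List.sorted row (fun v => v) false) = brow row - badI row := by
  set L := PySem.List.sorted row (fun v => v) false with hL
  have hperm : L.Perm row := PySem.List.sorted_perm row (fun v => v) false
  have hpw : L.Pairwise (· ≤ ·) := by
    simpa using PySem.List.sorted_pairwise row (fun v => v)
  have hlen : L.length = row.length := hperm.length_eq
  have hfin : L.toFinset = row.toFinset := List.toFinset_eq_of_perm _ _ hperm
  have hbrow := brow_eq row
  cases hLc : L with
  | nil =>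
      have hrow : row = [] := by
        have := hperm; rw [hLc] at this
        exact this.symm.eq_nil
      subst hrow
      simp [fA, brow, badI, starts, PySem.Set.ofList, hLc]
  | cons a t =>
      rw [hLc] at hpw hlen hfin
      have hcore := core t a hpw
      have hamin : ∀ x ∈ t, a ≤ x := (List.pairwise_cons.1 hpw).1
      have hbad : badI row = if a = -1 then 1 else 0 := by
        unfold badI
        by_cases ha : a = -1
        · subst ha
          rw [if_pos, if_pos rfl]
          constructor
          · have haL : (-1 : Int) ∈ (((-1) : Int) :: t) := by simp
            have := hperm
            rw [hLc] at this
            exact this.mem_iff.1 haL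
          · intro v hv
            have hvL : v ∈ ((-1 : Int) :: t) := by
              have := hperm; rw [hLc] at this
              exact this.mem_iff.2 hv
            rcases List.mem_cons.1 hvL with h | h
            · omega
            · exact hamin v h
        · rw [if_neg ha, if_neg]
          rintro ⟨hmem, hge⟩
          have hmemL : (-1 : Int) ∈ (a :: t) := by
            have := hperm; rw [hLc] at this
            exact this.mem_iff.2 hmem
          have haR : a ∈ row := by
            have := hperm; rw [hLc] at this
            exact this.mem_iff.1 (by simp)
          have h1 : (-1 : Int) ≤ a := hge a haR
          have h2 : a ≤ -1 := by
            rcases List.mem_cons.1 hmemL with h | h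
            · omega
            · exact hamin _ h
          omega
      have hfa : fA (-2) (a :: t) = (if a ≠ -1 then 1 else 0) + fA a t := by
        simp only [fA]
        norm_num
      rw [hfa, hbrow, ← hfin, ← hlen, hbad]
      simp only [List.length_cons] at hcore ⊢
      by_cases h : a = -1 <;> simp [h] at * <;> omega

-- the loop bodies of the two ports
def aBody (array : List (List Int)) (count x : Int) : Int :=
  ((PySem.List.pyRange 0 ((PySem.List.sorted (PySem.List.pyGetD array x []) (fun v => v) false).length : Int) 1).foldl
    (fun st y =>
      (if PySem.List.pyGetD (PySem.List.sorted (PySem.List.pyGetD array x []) (fun v => v) false) y 0 ≠ st.2 + 1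
        then st.1 + 1 else st.1,
       PySem.List.pyGetD (PySem.List.sorted (PySem.List.pyGetD array x []) (fun v => v) false) y 0))
    (count, -2)).1

def bBody (array : List (List Int)) (count x : Int) : Int :=
  count + (((PySem.List.pyGetD array x []).length : Int)
    - ((PySem.Set.ofList (PySem.List.pyGetD array x [])).length : Int)
    + ((PySem.Set.ofList (PySem.List.pyGetD array x [])).countP
        (fun v => !(PySem.Set.contains (PySem.Set.ofList (PySem.List.pyGetD array x [])) (v - 1))) : Int))

lemma aBody_eq (array : List (List Int)) (count x : Int) :
    aBody array count x = count + fA (-2) (PySem.List.sorted (PySem.List.pyGetD array x []) (fun v => v) false) := by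
  unfold aBody
  rw [PySem.List.foldl_pyRange_zero_pyGetD' (PySem.List.sorted (PySem.List.pyGetD array x []) (fun v => v) false) 0
    (fun st cv => (if cv ≠ st.2 + 1 then st.1 + 1 else st.1, cv)) (count, -2)]
  exact fA_fst _ count (-2)

lemma bBody_eq (array : List (List Int)) (count x : Int) :
    bBody array count x = count + brow (PySem.List.pyGetD array x []) := by
  rfl

lemma bBody_shift (array : List (List Int)) (idxs : List Int) : ∀ (c d : Int),
    idxs.foldl (bBody array) (c - d) = idxs.foldl (bBody array) c - d := by
  induction idxs with
  | nil => intro c d; simp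
  | cons x t ih =>
      intro c d
      simp only [List.foldl_cons, bBody_eq]
      rw [show c - d + brow (PySem.List.pyGetD array x []) =
        (c + brow (PySem.List.pyGetD array x [])) - d by ring, ih]

lemma main_fold (array : List (List Int)) (idxs : List Int) : ∀ (c : Int),
    idxs.foldl (aBody array) c
      = idxs.foldl (bBody array) c - (idxs.map (fun x => badI (PySem.List.pyGetD array x []))).sum := by
  induction idxs with
  | nil => intro c; simp
  | cons x t ih =>
      intro c
      simp only [List.foldl_cons, List.map_cons, List.sum_cons]
      rw [aBody_eq, row_key, ih]
      rw [show c + (brow (PySem.List.pyGetD array x []) - badI (PySem.List.pyGetD array x []))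
        = (c + brow (PySem.List.pyGetD array x [])) - badI (PySem.List.pyGetD array x []) by ring]
      rw [bBody_shift, ← bBody_eq]
      ring

lemma peri_eq (array : List (List Int)) :
    peri array = peri_alt array
      - ((PySem.List.pyRange 1 (array.length : Int) 2).map
          (fun x => badI (PySem.List.pyGetD array x []))).sum := by
  have h := main_fold array (PySem.List.pyRange 1 (array.length : Int) 2) 0
  exact h

lemma badI_nonneg (row : List Int) : 0 ≤ badI row := by
  unfold badI; split_ifs <;> omega

lemma sum_bad_zero (array : List (List Int)) (h : ¬ D_peri array) :
    ((PySem.List.pyRange 1 (array.length : Int) 2).map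
      (fun x => badI (PySem.List.pyGetD array x []))).sum = 0 := by
  apply List.sum_eq_zero
  intro v hv
  rcases List.mem_map.1 hv with ⟨x, hx, rfl⟩
  unfold badI
  rw [if_neg]
  intro hbad
  exact h ⟨x, hx, hbad⟩

lemma sum_bad_pos (array : List (List Int)) (h : D_peri array) :
    0 < ((PySem.List.pyRange 1 (array.length : Int) 2).map
      (fun x => badI (PySem.List.pyGetD array x []))).sum := by
  rcases h with ⟨x, hx, hbad⟩
  have hmem : badI (PySem.List.pyGetD array x [])
      ∈ (PySem.List.pyRange 1 (array.length : Int) 2).map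
          (fun x => badI (PySem.List.pyGetD array x [])) :=
    List.mem_map.2 ⟨x, hx, rfl⟩
  have h1 : badI (PySem.List.pyGetD array x []) = 1 := by
    unfold badI; rw [if_pos hbad]
  have hle := List.single_le_sum (fun v hv => by
    rcases List.mem_map.1 hv with ⟨y, _, rfl⟩
    exact badI_nonneg _) _ hmem
  omega

-- ===== VERDICT (by name: the statement is the Claim_ definition above) =====
theorem peri_spec : Claim_unchanged_peri := by
  intro array _ hD
  rw [peri_eq, sum_bad_zero array hD, sub_zero]

theorem peri_changed : Claim_changed_peri := by
  unfold Claim_changed_peri; decide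

theorem peri_tight : Claim_exact_peri := by
  intro array _ hD
  rw [peri_eq]
  have := sum_bad_pos array hD
  omega
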